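-- pv_equiv track=rewrite | github.com/drsuneamer/TIL | SSAFY_2022/aps/0329/5203.py | win1
-- ===== SOURCE A (Python) =====
-- def win1(lst):
--     for i in range(len(lst)):
--         if lst[i] >= 3:
--             return 1
--     for i in range(len(lst)-2):
--         if lst[i] >= 1 and lst[i+1] >= 1 and lst[i+2] >= 1:
--             return 1
--     return 0
-- ===== SOURCE B (Python) =====
-- def win1(lst):
--     run = 0
--     for x in lst:
--         if x >= 3:
--             return 1
--         if x >= 1:
--             run += 1
--             if run >= 3:
--                 return 1
--         else:
--             run = 0
--     return 0
-- ===== Notes on version B (the rewrite author's own statement) =====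
-- stated objective: simpler
-- what changed: Replaced A's two index-based passes (scan for a tile >= 3, then re-index a fixed 3-wide window) by one pass over the elements maintaining a running count of consecutive tiles >= 1, with early exit.
import Mathlib
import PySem

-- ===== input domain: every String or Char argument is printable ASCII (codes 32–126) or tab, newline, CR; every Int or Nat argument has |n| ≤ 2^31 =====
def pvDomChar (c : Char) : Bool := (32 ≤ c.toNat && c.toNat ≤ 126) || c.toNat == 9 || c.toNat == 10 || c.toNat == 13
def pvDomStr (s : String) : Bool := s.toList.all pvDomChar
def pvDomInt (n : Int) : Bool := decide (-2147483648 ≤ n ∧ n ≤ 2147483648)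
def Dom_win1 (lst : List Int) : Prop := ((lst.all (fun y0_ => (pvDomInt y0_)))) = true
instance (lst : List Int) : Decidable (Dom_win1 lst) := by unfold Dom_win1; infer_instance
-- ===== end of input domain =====

-- B fuses A's two index-based passes into one element pass keeping a count of consecutive tiles ≥ 1 (objective: simpler).


-- ===== PORT A =====
-- first pass: 'for i in range(len(lst)): if lst[i] >= 3: return 1'
def win1Loop1 : List Int → Bool
  | [] => false
  | x :: rest => if 3 ≤ x then true else win1Loop1 rest

-- second pass: 'for i in range(len(lst)-2): if lst[i] >= 1 and lst[i+1] >= 1 and lst[i+2] >= 1: return 1' then 'return 0'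
def win1Loop2 : List Int → Int
  | x :: y :: z :: rest => if 1 ≤ x ∧ 1 ≤ y ∧ 1 ≤ z then 1 else win1Loop2 (y :: z :: rest)
  | _ => 0

def win1 (lst : List Int) : Int :=
  if win1Loop1 lst then 1 else win1Loop2 lst

-- ===== PORT B =====
-- single pass with running count of consecutive tiles ≥ 1, early return on a hit
def win1AltLoop : List Int → Int → Int
  | [], _ => 0
  | x :: rest, run =>
    if 3 ≤ x then 1
    else if 1 ≤ x then
      if 3 ≤ run + 1 then 1 else win1AltLoop rest (run + 1)
    else win1AltLoop rest 0

def win1_alt (lst : List Int) : Int := win1AltLoop lst 0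

-- ===== PRECONDITION & SPEC =====
def Spec_win1 (lst : List Int) (out : Int) : Prop := out = win1_alt lst
instance (lst : List Int) (out : Int) : Decidable (Spec_win1 lst out) := by unfold Spec_win1; infer_instance

-- ===== CLAIM (what is proved, stated in full; the proofs are below) =====
def Claim_equal_win1 : Prop := ∀ (lst : List Int), Dom_win1 lst → Spec_win1 lst (win1 lst)

-- ===== LEMMAS AND PROOFS =====

-- whether some window of three consecutive elements is all ≥ 1
def win3 : List Int → Bool
  | x :: y :: z :: rest => if 1 ≤ x ∧ 1 ≤ y ∧ 1 ≤ z then true else win3 (y :: z :: rest)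
  | _ => false

-- whether the first k elements exist and are all ≥ 1
def prefOnes : List Int → Nat → Bool
  | _, 0 => true
  | [], _+1 => false
  | x :: r, k+1 => decide (1 ≤ x) && prefOnes r k

lemma win1Loop2_eq (l : List Int) : win1Loop2 l = if win3 l then 1 else 0 := by
  match l with
  | [] => simp [win1Loop2, win3]
  | [x] => simp [win1Loop2, win3]
  | [x, y] => simp [win1Loop2, win3]
  | x :: y :: z :: rest =>
    have ih := win1Loop2_eq (y :: z :: rest)
    by_cases h : 1 ≤ x ∧ 1 ≤ y ∧ 1 ≤ z <;> simp [win1Loop2, win3, h, ih]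
termination_by l.length

lemma prefOnes_le (l : List Int) : ∀ {j k : Nat}, j ≤ k → prefOnes l k = true → prefOnes l j = true := by
  induction l with
  | nil => intro j k hjk h; cases k with
    | zero => interval_cases j; exact h
    | succ k => simp [prefOnes] at h
  | cons x r ih =>
    intro j k hjk h
    cases j with
    | zero => simp [prefOnes]
    | succ j =>
      cases k with
      | zero => omega
      | succ k =>
        simp only [prefOnes, Bool.and_eq_true] at h ⊢
        exact ⟨h.1, ih (by omega) h.2⟩

lemma prefOnes3_win3 (l : List Int) (h : prefOnes l 3 = true) : win3 l = true := by
  match l with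
  | [] | [_] | [_, _] => simp [prefOnes] at h
  | x :: y :: z :: rest =>
    simp only [prefOnes, Bool.and_eq_true, decide_eq_true_eq] at h
    simp [win3, h.1, h.2.1, h.2.2.1]

lemma win3_cons_ge (x : Int) (r : List Int) (hx : 1 ≤ x) :
    win3 (x :: r) = (prefOnes r 2 || win3 r) := by
  match r with
  | [] | [_] => simp [win3, prefOnes]
  | y :: z :: rest =>
    by_cases hy : 1 ≤ y <;> by_cases hz : 1 ≤ z <;>
      simp [win3, prefOnes, hx, hy, hz]

lemma win3_cons_lt (x : Int) (r : List Int) (hx : ¬ 1 ≤ x) :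
    win3 (x :: r) = win3 r := by
  match r with
  | [] | [_] => simp [win3]
  | y :: z :: rest => simp [win3, hx]

lemma altLoop_eq (l : List Int) : ∀ (k : Nat), 1 ≤ k → k ≤ 3 →
    win1AltLoop l (3 - (k : Int)) =
      if win1Loop1 l || win3 l || prefOnes l k then 1 else 0 := by
  induction l with
  | nil =>
    intro k h1 h3
    cases k with
    | zero => omega
    | succ k => simp [win1AltLoop, win1Loop1, win3, prefOnes]
  | cons x r ih =>
    intro k h1 h3
    have e1 : (3 - ((1 : Nat) : Int)) = 2 := by norm_num
    have e2 : (3 - ((2 : Nat) : Int)) = 1 := by norm_num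
    have e3 : (3 - ((3 : Nat) : Int)) = 0 := by norm_num
    by_cases hx3 : 3 ≤ x
    · simp [win1AltLoop, win1Loop1, hx3]
    · by_cases hx1 : 1 ≤ x
      · interval_cases k
        · -- k = 1 : run = 2, hit
          rw [e1]
          have hL : win1AltLoop (x :: r) 2 = 1 := by norm_num [win1AltLoop, hx3, hx1]
          rw [hL]; simp [prefOnes, hx1]
        · -- k = 2
          rw [e2]
          have hstep : win1AltLoop (x :: r) 1 = win1AltLoop r 2 := by
            norm_num [win1AltLoop, hx3, hx1]
          have ih1 := ih 1 (by omega) (by omega)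
          rw [e1] at ih1
          rw [hstep, ih1, win3_cons_ge x r hx1]
          simp only [win1Loop1, hx3, if_false, prefOnes, hx1, decide_true, Bool.true_and]
          by_cases h2 : prefOnes r 2 = true
          · have h1' := prefOnes_le r (by omega : 1 ≤ 2) h2
            simp [h2, h1']
          · simp [h2]
        · -- k = 3
          rw [e3]
          have hstep : win1AltLoop (x :: r) 0 = win1AltLoop r 1 := by
            norm_num [win1AltLoop, hx3, hx1]
          have ih2 := ih 2 (by omega) (by omega)
          rw [e2] at ih2
          rw [hstep, ih2, win3_cons_ge x r hx1]
          simp only [win1Loop1, hx3, if_false, prefOnes, hx1, decide_true, Bool.true_and]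
          by_cases h2 : prefOnes r 2 = true
          · simp [h2]
          · simp [h2]
      · have hstep : win1AltLoop (x :: r) (3 - (k : Int)) = win1AltLoop r 0 := by
          simp [win1AltLoop, hx3, hx1]
        have ih3 := ih 3 (by omega) (by omega)
        rw [e3] at ih3
        rw [hstep, ih3, win3_cons_lt x r hx1]
        cases k with
        | zero => omega
        | succ k =>
          simp only [win1Loop1, hx3, if_false, prefOnes, hx1, decide_false, Bool.false_and]
          by_cases h3' : prefOnes r 3 = true
          · simp [h3', prefOnes3_win3 r h3']
          · simp [h3']

-- ===== VERDICT (by name: the statement is the Claim_ definition above) =====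
theorem win1_spec : Claim_equal_win1 := by
  intro lst _
  unfold Spec_win1 win1_alt win1
  have h := altLoop_eq lst 3 (by omega) (by omega)
  have e3 : (3 - ((3 : Nat) : Int)) = 0 := by norm_num
  rw [e3] at h
  rw [h, win1Loop2_eq]
  by_cases h3' : prefOnes lst 3 = true
  · simp [h3', prefOnes3_win3 lst h3']
  · by_cases h1 : win1Loop1 lst = true <;> simp [h3', h1]
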